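-- pv_equiv track=rewrite | github.com/ErikBoee/AdventOfCode | 2024/December17/b.py | findMinAvalue
-- ===== SOURCE A (Python) =====
-- def bFromAin(a):
--     tmp = (a%8)^6
--     return tmp^(a//(2**tmp))^7
--
-- def findMinAvalue(requiredAValue, requiredBvalues):
--     if len(requiredBvalues) == 0:
--         return requiredAValue
--     requiredBvalue = int(requiredBvalues[0])
--     approvedAValuesToTest = range(requiredAValue*8, requiredAValue*8 + 8)
--     candidates = []
--     for a in approvedAValuesToTest:
--         if bFromAin(a)%8 == requiredBvalue:
--             candidates.append(a)
--     if len(candidates) == 0: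
--         return -1
--     minAValues = []
--     for candidate in candidates:
--         value = findMinAvalue(candidate, requiredBvalues[1:])
--         if value != -1:
--             minAValues.append(value)
--     if len(minAValues) == 0:
--         return -1
--     return min(minAValues)
-- ===== SOURCE B (Python) =====
-- def bFromAin(a):
--     tmp = (a%8)^6
--     return tmp^(a//(2**tmp))^7
--
-- def findMinAvalue(requiredAValue, requiredBvalues):
--     # iterative BFS over the digits: keep the whole frontier of viable A values
--     frontier = [requiredAValue]
--     for b in requiredBvalues:
--         bb = int(b)
--         frontier = [a2 for a in frontier
--                     for a2 in range(a * 8, a * 8 + 8)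
--                     if bFromAin(a2) % 8 == bb]
--     return -1 if not frontier else min(frontier)
-- ===== Notes on version B (the rewrite author's own statement) =====
-- stated objective: alternative
-- what changed: Recursive DFS with a -1 failure sentinel and per-node min-merging is replaced by an iterative breadth-first frontier over the digits, taking one global min at the end.
import Mathlib
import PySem

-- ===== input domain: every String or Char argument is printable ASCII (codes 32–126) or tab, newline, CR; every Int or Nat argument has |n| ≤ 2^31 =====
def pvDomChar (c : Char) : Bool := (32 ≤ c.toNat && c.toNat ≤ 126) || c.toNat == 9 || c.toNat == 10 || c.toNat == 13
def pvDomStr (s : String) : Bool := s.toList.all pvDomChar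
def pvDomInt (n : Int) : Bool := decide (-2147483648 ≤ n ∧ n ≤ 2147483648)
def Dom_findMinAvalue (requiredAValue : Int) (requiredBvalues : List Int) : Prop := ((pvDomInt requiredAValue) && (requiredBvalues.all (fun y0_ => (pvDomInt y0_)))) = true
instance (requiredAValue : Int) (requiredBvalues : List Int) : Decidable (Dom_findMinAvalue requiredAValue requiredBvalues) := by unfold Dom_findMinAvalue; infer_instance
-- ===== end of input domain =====

-- B replaces A's recursive DFS (with -1 failure sentinel) by an iterative BFS frontier over the
-- digits with one global min at the end (objective: alternative decomposition, similar cost).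

-- ===== PORT A =====
-- module helper bFromAin, shared by both Python files verbatim.
-- 2**tmp: tmp = (a%8)^6 is always in 0..7, so Nat exponent tmp.toNat is exact.
def bFromAin (a : Int) : Int :=
  let tmp := PySem.Int.bxor (PySem.Int.mod a 8) 6
  PySem.Int.bxor (PySem.Int.bxor tmp (PySem.Int.floordiv a (2 ^ tmp.toNat))) 7

def findMinAvalue (requiredAValue : Int) (requiredBvalues : List Int) : Int :=
  match requiredBvalues with
  | [] => requiredAValue
  | requiredBvalue :: rest =>
    let approvedAValuesToTest := PySem.List.pyRange (requiredAValue * 8) (requiredAValue * 8 + 8) 1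
    let candidates := approvedAValuesToTest.foldl
      (fun cs a => if PySem.Int.mod (bFromAin a) 8 == requiredBvalue then cs ++ [a] else cs) []
    if candidates.length = 0 then -1
    else
      let minAValues := candidates.foldl
        (fun acc candidate =>
          let value := findMinAvalue candidate rest
          if value != -1 then acc ++ [value] else acc) []
      if minAValues.length = 0 then -1
      else (PySem.List.min? minAValues (fun x => x)).getD 0  -- min of a nonempty list; getD branch unreachable
termination_by requiredBvalues

-- ===== PORT B =====
def findMinAvalue_alt (requiredAValue : Int) (requiredBvalues : List Int) : Int :=
  let frontier := requiredBvalues.foldl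
    (fun fr b => fr.flatMap (fun a =>
      (PySem.List.pyRange (a * 8) (a * 8 + 8) 1).filter
        (fun a2 => PySem.Int.mod (bFromAin a2) 8 == b)))
    [requiredAValue]
  match PySem.List.min? frontier (fun x => x) with
  | none => -1          -- 'not frontier'
  | some m => m

-- ===== PRECONDITION & SPEC =====
def Spec_findMinAvalue (requiredAValue : Int) (requiredBvalues : List Int) (out : Int) : Prop := out = findMinAvalue_alt requiredAValue requiredBvalues
instance (requiredAValue : Int) (requiredBvalues : List Int) (out : Int) : Decidable (Spec_findMinAvalue requiredAValue requiredBvalues out) := by unfold Spec_findMinAvalue; infer_instance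

-- ===== CLAIM (what is proved, stated in full; the proofs are below) =====
def Claim_equal_findMinAvalue : Prop := ∀ (requiredAValue : Int) (requiredBvalues : List Int), Dom_findMinAvalue requiredAValue requiredBvalues → Spec_findMinAvalue requiredAValue requiredBvalues (findMinAvalue requiredAValue requiredBvalues)

-- ===== LEMMAS AND PROOFS =====

-- one BFS step and the candidate list of one node
def pvStep (fr : List Int) (b : Int) : List Int :=
  fr.flatMap (fun a =>
    (PySem.List.pyRange (a * 8) (a * 8 + 8) 1).filter
      (fun a2 => PySem.Int.mod (bFromAin a2) 8 == b))

def pvCands (a b : Int) : List Int :=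
  (PySem.List.pyRange (a * 8) (a * 8 + 8) 1).filter
    (fun a2 => PySem.Int.mod (bFromAin a2) 8 == b)

def pvLeaves (a : Int) (bs : List Int) : List Int := bs.foldl pvStep [a]

def pvOptMin (l : List Int) : Int :=
  match PySem.List.min? l (fun x => x) with
  | none => -1
  | some m => m

theorem alt_eq_optMin (a : Int) (bs : List Int) :
    findMinAvalue_alt a bs = pvOptMin (pvLeaves a bs) := rfl

theorem foldl_step_nil (bs : List Int) : List.foldl pvStep [] bs = [] := by
  induction bs with
  | nil => rfl
  | cons b bs ih => simpa [pvStep] using ih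

theorem foldl_step_append (bs xs ys : List Int) :
    List.foldl pvStep (xs ++ ys) bs = List.foldl pvStep xs bs ++ List.foldl pvStep ys bs := by
  induction bs generalizing xs ys with
  | nil => rfl
  | cons b bs ih =>
    simp only [List.foldl_cons]
    rw [show pvStep (xs ++ ys) b = pvStep xs b ++ pvStep ys b by
      simp [pvStep, List.flatMap_append]]
    exact ih _ _

theorem foldl_step_flatMap (bs xs : List Int) :
    List.foldl pvStep xs bs = xs.flatMap (fun a => pvLeaves a bs) := by
  induction xs with
  | nil => simpa using foldl_step_nil bs
  | cons x t ih =>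
    have : (x :: t) = [x] ++ t := rfl
    rw [this, foldl_step_append]
    simp [pvLeaves, ih]

theorem leaves_cons (a b : Int) (bs : List Int) :
    pvLeaves a (b :: bs) = (pvCands a b).flatMap (fun c => pvLeaves c bs) := by
  have h : pvStep [a] b = pvCands a b := by simp [pvStep, pvCands]
  simp only [pvLeaves, List.foldl_cons, h]
  exact foldl_step_flatMap bs _

theorem min?_id_eq_some {l : List Int} {m : Int} (hm : m ∈ l) (hmin : ∀ x ∈ l, m ≤ x) :
    PySem.List.min? l (fun x => x) = some m := by
  cases h : PySem.List.min? l (fun x => x) with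
  | none =>
    rw [PySem.List.min?_eq_none_iff] at h
    simp [h] at hm
  | some m' =>
    have h1 := PySem.List.min?_mem h
    have h2 := PySem.List.min?_isMin h
    have h3 : m ≤ m' := hmin m' h1
    have h4 : m' ≤ m := by simpa using h2 m hm
    simp [le_antisymm h4 h3]

theorem optMin_eq_of {l : List Int} {m : Int} (hm : m ∈ l) (hmin : ∀ x ∈ l, m ≤ x) :
    pvOptMin l = m := by
  simp [pvOptMin, min?_id_eq_some hm hmin]

-- a -1 leaf is always accompanied by a -2 leaf (the only parent of -1 is -1, and -2 matches the same digit)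
theorem aux_neg_two (bs : List Int) :
    ∀ a b : Int, (-1 : Int) ∈ pvLeaves a (b :: bs) → (-2 : Int) ∈ pvLeaves a (b :: bs) := by
  induction bs with
  | nil =>
    intro a b h
    rw [leaves_cons] at h ⊢
    simp only [pvLeaves, List.foldl_nil, List.mem_flatMap, List.mem_singleton] at h ⊢
    obtain ⟨c, hc, rfl⟩ := h
    unfold pvCands at hc
    obtain ⟨hr, hp⟩ := List.mem_filter.1 hc
    rw [PySem.List.mem_pyRange_one] at hr
    have ha : a = -1 := by omega
    subst ha
    have hb : b = 1 := by
      rw [show PySem.Int.mod (bFromAin (-1)) 8 = 1 from by decide] at hp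
      have := of_decide_eq_true (by simpa using hp)
      omega
    subst hb
    exact ⟨-2, by decide, rfl⟩
  | cons b2 rest ih =>
    intro a b h
    rw [leaves_cons] at h ⊢
    simp only [List.mem_flatMap] at h ⊢
    obtain ⟨c, hc, hmem⟩ := h
    exact ⟨c, hc, ih c b2 hmem⟩

theorem optMin_spec_of_ne_nil {l : List Int} (h : l ≠ []) :
    pvOptMin l ∈ l ∧ ∀ x ∈ l, pvOptMin l ≤ x := by
  cases hm : PySem.List.min? l (fun x => x) with
  | none => exact absurd ((PySem.List.min?_eq_none_iff _ _).1 hm) h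
  | some m =>
    have h1 := PySem.List.min?_mem hm
    have h2 := PySem.List.min?_isMin hm
    refine ⟨by simp [pvOptMin, hm, h1], ?_⟩
    intro x hx
    simpa [pvOptMin, hm] using h2 x hx

theorem main_eq (bs : List Int) : ∀ a : Int, findMinAvalue a bs = pvOptMin (pvLeaves a bs) := by
  induction bs with
  | nil =>
    intro a
    simp [findMinAvalue, pvLeaves, pvOptMin, PySem.List.min?_id_cons]
  | cons b rest ih =>
    intro a
    rw [findMinAvalue, leaves_cons]
    have hc : (PySem.List.pyRange (a * 8) (a * 8 + 8) 1).foldl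
        (fun cs x => if PySem.Int.mod (bFromAin x) 8 == b then cs ++ [x] else cs) [] = pvCands a b := by
      simpa [pvCands] using PySem.List.foldl_append_if_eq_filter
        (p := fun x => PySem.Int.mod (bFromAin x) 8 == b)
        (l := PySem.List.pyRange (a * 8) (a * 8 + 8) 1) (acc := [])
    simp only [hc]
    by_cases hnil : pvCands a b = []
    · simp [hnil, pvOptMin, PySem.List.min?]
    · have hlen : ¬ (pvCands a b).length = 0 := by
        simpa [List.length_eq_zero_iff] using hnil
      rw [if_neg hlen]
      simp only [ih]
      rw [PySem.List.foldl_append_if (p := fun c => pvOptMin (pvLeaves c rest) != -1)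
            (f := fun c => pvOptMin (pvLeaves c rest)) (l := pvCands a b) (acc := [])]
      simp only [List.nil_append]
      by_cases hT : (pvCands a b).flatMap (fun c => pvLeaves c rest) = []
      · have hall : ∀ c ∈ pvCands a b, pvLeaves c rest = [] := by
          simpa [List.flatMap_eq_nil_iff] using hT
        have hfe : (pvCands a b).filter (fun c => pvOptMin (pvLeaves c rest) != -1) = [] := by
          rw [List.filter_eq_nil_iff]
          intro c hcm
          simp [hall c hcm, pvOptMin, PySem.List.min?]
        rw [hfe, hT]
        simp [pvOptMin, PySem.List.min?]
      · -- frontier nonempty: extract the true minimum m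
        obtain ⟨m, hmT⟩ : ∃ m, PySem.List.min? ((pvCands a b).flatMap (fun c => pvLeaves c rest)) (fun x => x) = some m := by
          cases hx : PySem.List.min? ((pvCands a b).flatMap (fun c => pvLeaves c rest)) (fun x => x) with
          | none => exact absurd ((PySem.List.min?_eq_none_iff _ _).1 hx) hT
          | some m => exact ⟨m, rfl⟩
        have hmem := PySem.List.min?_mem hmT
        have hmin : ∀ x ∈ (pvCands a b).flatMap (fun c => pvLeaves c rest), m ≤ x := by
          intro x hx
          simpa using PySem.List.min?_isMin hmT x hx
        have hm1 : m ≠ -1 := by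
          intro h
          subst h
          have h2 : (-2 : Int) ∈ pvLeaves a (b :: rest) := by
            apply aux_neg_two
            rw [leaves_cons]
            exact hmem
          rw [leaves_cons] at h2
          have := hmin _ h2
          omega
        obtain ⟨c0, hc0, hmc0⟩ := List.mem_flatMap.1 hmem
        have hopt0 : pvOptMin (pvLeaves c0 rest) = m := by
          apply optMin_eq_of hmc0
          intro x hx
          exact hmin x (List.mem_flatMap.2 ⟨c0, hc0, hx⟩)
        have hmemL : m ∈ ((pvCands a b).filter (fun c => pvOptMin (pvLeaves c rest) != -1)).map
            (fun c => pvOptMin (pvLeaves c rest)) := by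
          refine List.mem_map.2 ⟨c0, List.mem_filter.2 ⟨hc0, by simp [hopt0, hm1]⟩, hopt0⟩
        have hlow : ∀ v ∈ ((pvCands a b).filter (fun c => pvOptMin (pvLeaves c rest) != -1)).map
            (fun c => pvOptMin (pvLeaves c rest)), m ≤ v := by
          intro v hv
          obtain ⟨c, hcf, rfl⟩ := List.mem_map.1 hv
          obtain ⟨hcc, hne⟩ := List.mem_filter.1 hcf
          have hlne : pvLeaves c rest ≠ [] := by
            intro h
            simp [h, pvOptMin, PySem.List.min?] at hne
          obtain ⟨hin, _⟩ := optMin_spec_of_ne_nil hlne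
          exact hmin _ (List.mem_flatMap.2 ⟨c, hcc, hin⟩)
        have hLne : ((pvCands a b).filter (fun c => pvOptMin (pvLeaves c rest) != -1)).map
            (fun c => pvOptMin (pvLeaves c rest)) ≠ [] := by
          intro h
          rw [h] at hmemL
          simp at hmemL
        rw [if_neg (by simpa [List.length_eq_zero_iff] using hLne)]
        rw [min?_id_eq_some hmemL hlow]
        simp [pvOptMin, hmT]

-- ===== VERDICT (by name: the statement is the Claim_ definition above) =====
theorem findMinAvalue_spec : Claim_equal_findMinAvalue := by
  intro a bs _
  unfold Spec_findMinAvalue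
  rw [alt_eq_optMin, main_eq]
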